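-- pv_equiv track=rewrite | github.com/ty-hayes-82/data-analyst-agent | data_analyst_agent/sub_agents/executive_brief_agent/report_utils.py | _extract_insight_cards
-- ===== SOURCE A (Python) =====
-- def _extract_insight_cards(markdown: str, max_cards: int = 5) -> str:
--     """Pull up to ``max_cards`` insight card blocks from a metric report."""
--     lines = markdown.splitlines()
--     in_section = False
--     card_lines: list[str] = []
--     card_count = 0
--     for line in lines:
--         if line.startswith("## Insight Cards"):
--             in_section = True
--             continue
--         if in_section:
--             if line.startswith("## ") and "Insight Cards" not in line:
--                 break
--             if line.startswith("### "):
--                 card_count += 1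
--                 if card_count > max_cards:
--                     break
--             card_lines.append(line)
--     return "\n".join(card_lines).strip()
-- ===== SOURCE B (Python) =====
-- def _extract_insight_cards(markdown: str, max_cards: int = 5) -> str:
--     """Pull up to ``max_cards`` insight card blocks from a metric report."""
--     lines = markdown.splitlines()
--     # locate the section header and take the lines after it
--     for i, line in enumerate(lines):
--         if line.startswith("## Insight Cards"):
--             tail = lines[i + 1:]
--             break
--     else:
--         return ""
--     # cut the section at the next top-level header
--     section = []
--     for line in tail:
--         if line.startswith("## ") and "Insight Cards" not in line:
--             break
--         section.append(line)
--     # keep lines, truncating before the card that would exceed max_cards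
--     kept = []
--     count = 0
--     for line in section:
--         if line.startswith("### "):
--             count += 1
--             if count > max_cards:
--                 break
--         kept.append(line)
--     return "\n".join(kept).strip()
-- ===== Notes on version B (the rewrite author's own statement) =====
-- stated objective: alternative
-- what changed: Replaces A's single fused stateful loop (in_section flag + counter + two kinds of break) by a three-phase decomposition: locate the section header, cut the section at the next top-level header, truncate before the card over max_cards; Pre_ excludes markdown with more than one '## Insight Cards' header line, a duplicate-header corner where A's re-entering/skipping of repeated headers is as defensible as keeping them.
import Mathlib
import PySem

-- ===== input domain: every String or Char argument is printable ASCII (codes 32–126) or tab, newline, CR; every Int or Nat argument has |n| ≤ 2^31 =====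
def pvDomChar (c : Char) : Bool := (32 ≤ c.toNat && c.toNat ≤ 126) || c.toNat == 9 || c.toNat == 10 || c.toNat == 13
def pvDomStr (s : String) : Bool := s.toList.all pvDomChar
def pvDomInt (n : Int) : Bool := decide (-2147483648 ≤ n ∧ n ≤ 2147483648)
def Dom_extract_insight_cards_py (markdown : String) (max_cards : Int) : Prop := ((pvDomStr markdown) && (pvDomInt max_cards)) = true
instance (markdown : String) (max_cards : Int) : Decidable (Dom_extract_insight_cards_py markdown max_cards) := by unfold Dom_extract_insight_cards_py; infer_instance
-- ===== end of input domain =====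

-- B replaces A's single fused stateful loop by a locate / cut / truncate three-phase
-- decomposition (objective: alternative; same cost).

-- ===== PORT A =====
-- A's fused loop: in_section flag, card counter, break encoded as returning []
def pvA_loop (ls : List String) (in_section : Bool) (card_count : Int) (max_cards : Int) : List String :=
  match ls with
  | [] => []
  | line :: rest =>
    if PySem.Str.startswith line "## Insight Cards" then
      pvA_loop rest true card_count max_cards
    else if in_section then
      (if PySem.Str.startswith line "## " && !(PySem.Str.isIn "Insight Cards" line) then []
       else if PySem.Str.startswith line "### " then
         (if card_count + 1 > max_cards then []
          else line :: pvA_loop rest in_section (card_count + 1) max_cards)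
       else line :: pvA_loop rest in_section card_count max_cards)
    else
      pvA_loop rest in_section card_count max_cards

def extract_insight_cards_py (markdown : String) (max_cards : Int) : String :=
  PySem.Str.strip (PySem.Str.join "\n" (pvA_loop (PySem.Str.splitlines markdown) false 0 max_cards))

-- ===== PORT B =====
-- phase 1: locate the section header, return the lines after it (none = header absent)
def pvB_skip (ls : List String) : Option (List String) :=
  match ls with
  | [] => none
  | l :: rest => if PySem.Str.startswith l "## Insight Cards" then some rest else pvB_skip rest

-- phase 2: cut the section at the next top-level header
def pvB_section (ls : List String) : List String :=
  match ls with
  | [] => []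
  | l :: rest =>
    if PySem.Str.startswith l "## " && !(PySem.Str.isIn "Insight Cards" l) then []
    else l :: pvB_section rest

-- phase 3: keep lines, truncating before the card that would exceed max_cards
def pvB_take (ls : List String) (count : Int) (max_cards : Int) : List String :=
  match ls with
  | [] => []
  | l :: rest =>
    if PySem.Str.startswith l "### " then
      (if count + 1 > max_cards then [] else l :: pvB_take rest (count + 1) max_cards)
    else l :: pvB_take rest count max_cards

def extract_insight_cards_py_alt (markdown : String) (max_cards : Int) : String :=
  match pvB_skip (PySem.Str.splitlines markdown) with
  | none => ""
  | some tail => PySem.Str.strip (PySem.Str.join "\n" (pvB_take (pvB_section tail) 0 max_cards))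

-- ===== PRECONDITION & SPEC =====
-- Pre_ excludes markdown with more than one '## Insight Cards' header line: on such
-- duplicate-header input A skips the repeated headers and restarts the section while B keeps
-- them as section content — a degenerate corner where either value is defensible.
def Pre_extract_insight_cards_py (markdown : String) (max_cards : Int) : Prop :=
  (PySem.Str.splitlines markdown).countP (fun l => PySem.Str.startswith l "## Insight Cards") ≤ 1
instance (markdown : String) (max_cards : Int) : Decidable (Pre_extract_insight_cards_py markdown max_cards) := by unfold Pre_extract_insight_cards_py; infer_instance

def pvWitness_extract_insight_cards_py : String × Int := ("## Insight Cards\n### Revenue\nup 3%\n## Next\nx", 5)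

def Spec_extract_insight_cards_py (markdown : String) (max_cards : Int) (out : String) : Prop := out = extract_insight_cards_py_alt markdown max_cards
instance (markdown : String) (max_cards : Int) (out : String) : Decidable (Spec_extract_insight_cards_py markdown max_cards out) := by unfold Spec_extract_insight_cards_py; infer_instance

-- ===== CLAIM (what is proved, stated in full; the proofs are below) =====
def Claim_equal_extract_insight_cards_py : Prop := ∀ (markdown : String) (max_cards : Int), Dom_extract_insight_cards_py markdown max_cards → Pre_extract_insight_cards_py markdown max_cards → Spec_extract_insight_cards_py markdown max_cards (extract_insight_cards_py markdown max_cards)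

-- ===== LEMMAS AND PROOFS =====
-- inside a header-free section tail, A's fused loop is B's truncate pass over B's cut section
theorem pvA_loop_true (ls : List String) (c m : Int)
    (hno : ∀ l ∈ ls, PySem.Str.startswith l "## Insight Cards" = false) :
    pvA_loop ls true c m = pvB_take (pvB_section ls) c m := by
  induction ls generalizing c with
  | nil => rfl
  | cons l rest ih =>
    have hh : PySem.Str.startswith l "## Insight Cards" = false := hno l (by simp)
    have hrest : ∀ l' ∈ rest, PySem.Str.startswith l' "## Insight Cards" = false :=
      fun l' hl' => hno l' (by simp [hl'])
    simp at hh
    by_cases hstop : (PySem.Str.startswith l "## " && !(PySem.Str.isIn "Insight Cards" l)) = true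
    · simp at hstop
      simp [pvA_loop, pvB_section, pvB_take, hh, hstop]
    · by_cases hcard : PySem.Str.startswith l "### " = true
      · simp at hstop hcard
        by_cases hc : m ≤ c
        · by_cases hS : PySem.Chars.startswith l.toList ['#', '#', ' '] = true
          · have hI := hstop hS
            simp [pvA_loop, pvB_section, pvB_take, hh, hcard, hS, hI, hc]
          · simp at hS
            simp [pvA_loop, pvB_section, pvB_take, hh, hcard, hS, hc]
        · by_cases hS : PySem.Chars.startswith l.toList ['#', '#', ' '] = true
          · have hI := hstop hS
            simp [pvA_loop, pvB_section, pvB_take, hh, hcard, hS, hI, hc, ih _ hrest]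
          · simp at hS
            simp [pvA_loop, pvB_section, pvB_take, hh, hcard, hS, hc, ih _ hrest]
      · simp at hstop hcard
        by_cases hS : PySem.Chars.startswith l.toList ['#', '#', ' '] = true
        · have hI := hstop hS
          simp [pvA_loop, pvB_section, pvB_take, hh, hcard, hS, hI, ih _ hrest]
        · simp at hS
          simp [pvA_loop, pvB_section, pvB_take, hh, hcard, hS, ih _ hrest]

-- before the section, A's loop is B's locate phase followed by the two parse phases
theorem pvA_loop_false (ls : List String) (c m : Int)
    (hpre : ls.countP (fun l => PySem.Str.startswith l "## Insight Cards") ≤ 1) :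
    pvA_loop ls false c m =
      (match pvB_skip ls with
       | none => []
       | some tail => pvB_take (pvB_section tail) c m) := by
  induction ls with
  | nil => rfl
  | cons l rest ih =>
    by_cases hh : PySem.Str.startswith l "## Insight Cards" = true
    · simp at hh
      have hz : rest.countP (fun l => PySem.Str.startswith l "## Insight Cards") = 0 := by
        have hc : (l :: rest).countP (fun s => PySem.Str.startswith s "## Insight Cards")
            = rest.countP (fun s => PySem.Str.startswith s "## Insight Cards") + 1 := by
          simp [hh]
        omega
      have hno : ∀ l' ∈ rest, PySem.Str.startswith l' "## Insight Cards" = false := by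
        intro l' hl'
        have := List.countP_eq_zero.mp hz l' hl'
        simpa using this
      simp [pvA_loop, pvB_skip, hh, pvA_loop_true rest c m hno]
    · simp at hh
      have hpre' : rest.countP (fun l => PySem.Str.startswith l "## Insight Cards") ≤ 1 := by
        have hc : (l :: rest).countP (fun s => PySem.Str.startswith s "## Insight Cards")
            = rest.countP (fun s => PySem.Str.startswith s "## Insight Cards") := by
          simp [hh]
        omega
      simp [pvA_loop, pvB_skip, hh, ih hpre']

-- ===== VERDICT (by name: the statement is the Claim_ definition above) =====
theorem extract_insight_cards_py_spec : Claim_equal_extract_insight_cards_py := by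
  intro markdown max_cards _ hpre
  unfold Spec_extract_insight_cards_py extract_insight_cards_py extract_insight_cards_py_alt
  rw [pvA_loop_false _ _ _ hpre]
  cases h : pvB_skip (PySem.Str.splitlines markdown) with
  | none => rfl
  | some tail => rfl
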